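-- pv_equiv track=rewrite | github.com/aloix123/Korepetycje | informator/73/zad73.py | zad3
-- ===== SOURCE A (Python) =====
-- def zad3(data):
--     longestwunderword=0
--     underWordList=[]
--     for word in data:
--         localcount=0
--         for letter in word:
--             if letter not in { "A", "E", "I", "O", "U","Y"}:
--                 localcount+=1
--             else:
--                 localcount=0
--             if longestwunderword == localcount:
--                 underWordList.append(word)
--             if longestwunderword<localcount:
--                 longestwunderword=localcount
--                 underWordList=[word]
--
--     return underWordList[0],longestwunderword,len(set(underWordList))
-- ===== SOURCE B (Python) =====
-- def zad3(data):
--     def maxrun(word):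
--         best = cur = 0
--         for ch in word:
--             cur = 0 if ch in "AEIOUY" else cur + 1
--             if cur > best:
--                 best = cur
--         return best
--
--     runs = [maxrun(w) for w in data]
--     M = max(runs, default=0)
--     qualifiers = [w for w, r in zip(data, runs) if r == M]
--     return qualifiers[0], M, len(set(qualifiers))
-- ===== Notes on version B (the rewrite author's own statement) =====
-- stated objective: simpler
-- what changed: A's single interleaved pass that tracks the running maximum and resets/appends a duplicate-laden word list letter by letter is replaced by a compute-then-filter decomposition (maxrun per word, global max, one filter); Pre_ excludes the inputs where A raises IndexError (no nonempty word) and the defensible corner where the data contains the empty string and no word has a consonant, where whether '' counts as having a zero-length consonant run is anybody's choice (A omits it, B includes it).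
-- outside the precondition, e.g. on zad3(['', 'AE']): A returns ('AE', 0, 1), B returns ('', 0, 2); on zad3(['']): A raises IndexError, B returns ('', 0, 1)
-- crash fix: On nonempty lists whose words are all empty, A raises IndexError (its qualifier list stays empty) while B returns ('', 0, 1). — e.g. on zad3([""]): A raises IndexError, B returns ("", 0, 1)
import Mathlib
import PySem

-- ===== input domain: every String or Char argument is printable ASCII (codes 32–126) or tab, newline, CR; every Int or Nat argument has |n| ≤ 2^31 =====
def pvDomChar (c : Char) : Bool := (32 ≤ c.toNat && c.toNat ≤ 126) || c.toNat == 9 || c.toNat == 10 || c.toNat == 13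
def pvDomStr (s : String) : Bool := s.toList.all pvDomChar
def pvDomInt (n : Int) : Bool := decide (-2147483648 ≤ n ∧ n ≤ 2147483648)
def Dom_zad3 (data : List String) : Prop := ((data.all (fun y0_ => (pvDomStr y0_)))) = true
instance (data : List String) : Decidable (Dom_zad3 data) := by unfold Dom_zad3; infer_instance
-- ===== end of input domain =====

-- B replaces A's single interleaved max-tracking/reset pass by a compute-maxruns-then-filter
-- decomposition (objective: simpler); Pre_ excludes A's IndexError inputs and one defensible corner (see below).


-- ===== PORT A =====
-- `letter in {"A","E","I","O","U","Y"}`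
def isVowel (c : Char) : Bool := ['A','E','I','O','U','Y'].contains c

-- body of A's inner `for letter in word` loop; state = (localcount, longestwunderword, underWordList)
def innerA (word : String) (s : Int × Int × List String) (letter : Char) : Int × Int × List String :=
  let lc : Int := if isVowel letter then 0 else s.1 + 1
  let ul : List String := if s.2.1 == lc then s.2.2 ++ [word] else s.2.2
  if s.2.1 < lc then (lc, lc, [word]) else (lc, s.2.1, ul)

-- body of A's outer `for word in data` loop (localcount restarts at 0 and dies with the word)
def zad3Step (st : Int × List String) (word : String) : Int × List String :=
  let r := word.toList.foldl (innerA word) (0, st.1, st.2)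
  (r.2.1, r.2.2)

def zad3 (data : List String) : String × Int × Int :=
  let r := data.foldl zad3Step (0, [])
  -- underWordList[0] raises IndexError when the list is empty; Pre_zad3 excludes exactly that,
  -- so the total port may return "" there
  ((r.2.head?.getD ""), r.1, PySem.Set.len (PySem.Set.ofList r.2))

-- ===== PORT B =====
-- B's helper `maxrun`: longest consecutive-consonant run of a word
def maxrunAlt (w : List Char) : Int :=
  (w.foldl (fun (s : Int × Int) ch =>
    let cur : Int := if isVowel ch then 0 else s.2 + 1
    (if cur > s.1 then cur else s.1, cur)) (0, 0)).1

def zad3_alt (data : List String) : String × Int × Int :=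
  let runs := data.map (fun w => maxrunAlt w.toList)
  let M := runs.foldl max 0        -- max(runs, default=0); all entries are ≥ 0
  let qualifiers := ((data.zip runs).filter (fun p => p.2 == M)).map Prod.fst
  -- qualifiers[0] raises IndexError when empty; excluded by Pre_zad3
  (qualifiers.head?.getD "", M, PySem.Set.len (PySem.Set.ofList qualifiers))

-- ===== PRECONDITION & SPEC =====
-- Pre_ excludes (a) the inputs with no nonempty word, where A raises IndexError, and (b) the
-- defensible corner where data contains "" and no word has a consonant (max run 0): whether ""
-- counts as having a zero-length consonant run is anybody's choice — A omits it, B includes it.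
def Pre_zad3 (data : List String) : Prop :=
  (∃ w ∈ data, w ≠ "") ∧ ("" ∈ data → ∃ w ∈ data, ∃ c ∈ w.toList, isVowel c = false)
instance (data : List String) : Decidable (Pre_zad3 data) := by unfold Pre_zad3; infer_instance
def pvWitness_zad3 : List String := (["BCD", "AE", "xY"])

-- On nonempty lists whose words are all empty, A raises IndexError (its qualifier list stays
-- empty) while B returns ("", 0, 1).
def Raises_zad3 (data : List String) : Prop := data ≠ [] ∧ ∀ w ∈ data, w = ""
instance (data : List String) : Decidable (Raises_zad3 data) := by unfold Raises_zad3; infer_instance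
def pvRaiseWitness_zad3 : List String := ([""])
def pvRaiseWitnessOut_zad3 : String × Int × Int := ("", 0, 1)

def Spec_zad3 (data : List String) (out : String × Int × Int) : Prop := out = zad3_alt data
instance (data : List String) (out : String × Int × Int) : Decidable (Spec_zad3 data out) := by unfold Spec_zad3; infer_instance

-- ===== CLAIM (what is proved, stated in full; the proofs are below) =====
def Claim_equal_zad3 : Prop := ∀ (data : List String), Dom_zad3 data → Pre_zad3 data → Spec_zad3 data (zad3 data)
def Claim_raises_zad3 : Prop := (∀ (data : List String), Dom_zad3 data → Raises_zad3 data → ¬ Pre_zad3 data) ∧ (Dom_zad3 (pvRaiseWitness_zad3) ∧ Raises_zad3 (pvRaiseWitness_zad3) ∧ zad3_alt (pvRaiseWitness_zad3) = pvRaiseWitnessOut_zad3)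

-- ===== LEMMAS AND PROOFS =====

-- max run value reached strictly inside u when entering with current run c (-1 when u = [])
def hRun (c : Int) : List Char → Int
  | [] => -1
  | x :: u => max (if isVowel x then 0 else c + 1) (hRun (if isVowel x then 0 else c + 1) u)

theorem hRun_nonneg {c : Int} (hc : 0 ≤ c) {u : List Char} (hu : u ≠ []) : 0 ≤ hRun c u := by
  cases u with
  | nil => exact absurd rfl hu
  | cons x u => simp only [hRun]; split <;> omega

theorem maxrunAlt_fold (u : List Char) : ∀ b c : Int, 0 ≤ b →
    (u.foldl (fun (s : Int × Int) ch =>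
      let cur : Int := if isVowel ch then 0 else s.2 + 1
      (if cur > s.1 then cur else s.1, cur)) (b, c)).1 = max b (hRun c u) := by
  induction u with
  | nil => intro b c hb; simp [hRun]; omega
  | cons x u ih =>
    intro b c hb
    simp only [List.foldl_cons, hRun]
    show (u.foldl _ (if (if isVowel x then 0 else c + 1) > b then (if isVowel x then 0 else c + 1) else b,
      (if isVowel x then 0 else c + 1))).1 = _
    rw [ih _ _ (by split <;> omega)]
    split <;> omega

theorem maxrunAlt_eq (w : List Char) : maxrunAlt w = max 0 (hRun 0 w) :=
  maxrunAlt_fold w 0 0 le_rfl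

-- set(xs ++ [a]) extends set(xs) by add
theorem ofList_append_singleton {α : Type} [BEq α] (l : List α) (a : α) :
    PySem.Set.ofList (l ++ [a]) = PySem.Set.add (PySem.Set.ofList l) a := by
  rw [PySem.Set.ofList_eq_foldl, PySem.Set.ofList_eq_foldl, List.foldl_append]; rfl

theorem set_add_idem {α : Type} [BEq α] [LawfulBEq α] (s : PySem.Set α) (a : α) :
    PySem.Set.add (PySem.Set.add s a) a = PySem.Set.add s a := by
  by_cases hc : PySem.Set.contains s a = true
  · have h1 : PySem.Set.add s a = s := by unfold PySem.Set.add; rw [if_pos hc]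
    rw [h1, h1]
  · have h1 : PySem.Set.add s a = s ++ [a] := by unfold PySem.Set.add; rw [if_neg hc]
    rw [h1]
    unfold PySem.Set.add
    rw [if_pos (by simp [PySem.Set.contains])]

-- A's inner-loop body with the lets inlined (definitional)
theorem innerA_eq (word : String) (c L : Int) (ul : List String) (x : Char) :
    innerA word (c, L, ul) x =
      (if L < (if isVowel x = true then (0 : Int) else c + 1) then
        ((if isVowel x = true then (0 : Int) else c + 1),
         (if isVowel x = true then (0 : Int) else c + 1), [word])
      else
        ((if isVowel x = true then (0 : Int) else c + 1), L,
         if (L == (if isVowel x = true then (0 : Int) else c + 1)) = true then ul ++ [word] else ul)) := rfl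

-- A's inner loop, fully characterised (set-of-list view of underWordList)
theorem innerA_fold (word : String) (u : List Char) : ∀ (c L : Int) (ul : List String),
    0 ≤ c → 0 ≤ L →
    (u.foldl (innerA word) (c, L, ul)).2.1 = max L (hRun c u) ∧
    PySem.Set.ofList (u.foldl (innerA word) (c, L, ul)).2.2 =
      (if L < hRun c u then [word]
       else if hRun c u = L then PySem.Set.add (PySem.Set.ofList ul) word
       else PySem.Set.ofList ul) := by
  induction u with
  | nil =>
    intro c L ul hc hL
    constructor
    · simp [hRun]; omega
    · simp only [List.foldl_nil, hRun]
      rw [if_neg (by omega), if_neg (by omega)]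
  | cons x u ih =>
    intro c L ul hc hL
    obtain ⟨c', hgc', hc'0⟩ : ∃ c' : Int,
        (if isVowel x = true then (0 : Int) else c + 1) = c' ∧ 0 ≤ c' :=
      ⟨_, rfl, by split <;> omega⟩
    simp only [List.foldl_cons, hRun]
    rw [innerA_eq]
    simp only [hgc']
    by_cases hlt : L < c'
    · rw [if_pos hlt]
      obtain ⟨h1, h2⟩ := ih c' c' [word] hc'0 hc'0
      refine ⟨by rw [h1]; omega, ?_⟩
      have hmax : L < max c' (hRun c' u) := by omega
      rw [h2, if_pos hmax]
      have hofl : PySem.Set.ofList [word] = [word] := rfl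
      by_cases h3 : c' < hRun c' u
      · rw [if_pos h3]
      · rw [if_neg h3]
        by_cases h4 : hRun c' u = c'
        · rw [if_pos h4, hofl]; simp [PySem.Set.add, PySem.Set.contains]
        · rw [if_neg h4, hofl]
    · rw [if_neg hlt]
      by_cases heq : L = c'
      · have hbeq : (L == c') = true := by simp only [beq_iff_eq]; omega
        rw [if_pos hbeq]
        obtain ⟨h1, h2⟩ := ih c' L (ul ++ [word]) hc'0 hL
        refine ⟨by rw [h1]; omega, ?_⟩
        rw [h2, ofList_append_singleton]
        by_cases h3 : L < hRun c' u
        · have hr : L < max c' (hRun c' u) := by omega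
          rw [if_pos h3, if_pos hr]
        · have hr : ¬ L < max c' (hRun c' u) := by omega
          have hr2 : max c' (hRun c' u) = L := by omega
          rw [if_neg h3, if_neg hr, if_pos hr2]
          by_cases h4 : hRun c' u = L
          · rw [if_pos h4, set_add_idem]
          · rw [if_neg h4]
      · have hbeq : ¬ (L == c') = true := by simp only [beq_iff_eq]; omega
        rw [if_neg hbeq]
        obtain ⟨h1, h2⟩ := ih c' L ul hc'0 hL
        refine ⟨by rw [h1]; omega, ?_⟩
        rw [h2]
        by_cases h3 : L < hRun c' u
        · have hr : L < max c' (hRun c' u) := by omega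
          rw [if_pos h3, if_pos hr]
        · have hr : ¬ L < max c' (hRun c' u) := by omega
          rw [if_neg h3, if_neg hr]
          by_cases h4 : hRun c' u = L
          · have hr2 : max c' (hRun c' u) = L := by omega
            rw [if_pos h4, if_pos hr2]
          · have hr2 : ¬ max c' (hRun c' u) = L := by omega
            rw [if_neg h4, if_neg hr2]

-- abbreviations used only by the proofs
def mrS (w : String) : Int := maxrunAlt w.toList
def lofP (P : List String) : Int := P.foldl (fun a w => max a (mrS w)) 0
-- A's qualifier set (empty words never enter the inner loop, hence never qualify)
def qualP (P : List String) : List String := P.filter (fun w => w != "" && mrS w == lofP P)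
-- B's qualifier list
def qualB (P : List String) : List String := P.filter (fun w => mrS w == lofP P)

theorem lofP_nonneg (P : List String) : 0 ≤ lofP P :=
  (PySem.List.le_foldl_max_int P mrS 0).1

theorem mrS_le_lofP {P : List String} {w : String} (h : w ∈ P) : mrS w ≤ lofP P :=
  (PySem.List.le_foldl_max_int P mrS 0).2 w h

theorem mrS_pos_ne_empty {w : String} (h : 0 < mrS w) : w ≠ "" := by
  intro hw; subst hw; simp [mrS, maxrunAlt] at h

-- a word containing a consonant has max run ≥ 1
theorem hRun_pos_of_cons : ∀ (u : List Char) (c : Int), 0 ≤ c →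
    (∃ x ∈ u, isVowel x = false) → 1 ≤ hRun c u := by
  intro u
  induction u with
  | nil => intro c _ h; obtain ⟨x, hx, _⟩ := h; simp at hx
  | cons y u ih =>
    intro c hc h
    simp only [hRun]
    by_cases hy : isVowel y = true
    · obtain ⟨x, hx, hxv⟩ := h
      rcases List.mem_cons.mp hx with rfl | hx'
      · rw [hy] at hxv; cases hxv
      · have := ih 0 le_rfl ⟨x, hx', hxv⟩
        simp only [hy, if_true]; omega
    · rw [if_neg hy]
      have h2 : c + 1 ≤ max (c + 1) (hRun (c + 1) u) := le_max_left _ _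
      omega

theorem mrS_pos_of_cons {w : String} (h : ∃ c ∈ w.toList, isVowel c = false) : 1 ≤ mrS w := by
  have := hRun_pos_of_cons w.toList 0 le_rfl h
  have := maxrunAlt_eq w.toList
  simp only [mrS]; omega

-- under Pre_, every qualifying word is nonempty, so A's and B's filters agree
theorem qualB_eq_qualP {P : List String} (hpre : Pre_zad3 P) : qualB P = qualP P := by
  unfold qualB qualP
  refine (List.filter_congr ?_).symm
  intro w hw
  show (w != "" && mrS w == lofP P) = (mrS w == lofP P)
  rw [Bool.eq_iff_iff]
  simp only [Bool.and_eq_true, bne_iff_ne, ne_eq, beq_iff_eq]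
  constructor
  · exact fun h => h.2
  · intro h
    refine ⟨?_, h⟩
    intro hwempty
    subst hwempty
    have h0 : mrS "" = 0 := rfl
    obtain ⟨w', hw', c, hc, hcv⟩ := hpre.2 hw
    have h1 := mrS_pos_of_cons ⟨c, hc, hcv⟩
    have h2 := mrS_le_lofP hw'
    omega

-- A's word step, phrased against B's maxrun
theorem zad3Step_spec (L : Int) (ul : List String) (word : String) (hL : 0 ≤ L) :
    (zad3Step (L, ul) word).1 = max L (mrS word) ∧
    PySem.Set.ofList (zad3Step (L, ul) word).2 =
      (if L < mrS word then [word]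
       else if mrS word = L ∧ word ≠ "" then PySem.Set.add (PySem.Set.ofList ul) word
       else PySem.Set.ofList ul) := by
  obtain ⟨h1, h2⟩ := innerA_fold word word.toList 0 L ul le_rfl hL
  have hmr : mrS word = max 0 (hRun 0 word.toList) := maxrunAlt_eq word.toList
  simp only [zad3Step]
  by_cases hne : word.toList = []
  · have hempty : word = "" := String.toList_eq_nil_iff.mp hne
    have hr : hRun 0 word.toList = -1 := by rw [hne]; rfl
    refine ⟨by rw [h1]; omega, ?_⟩
    rw [h2, if_neg (by omega), if_neg (by omega), if_neg (by omega),
      if_neg (fun h => h.2 hempty)]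
  · have hpos : 0 ≤ hRun 0 word.toList := hRun_nonneg le_rfl hne
    have hmr' : mrS word = hRun 0 word.toList := by omega
    have hwe : word ≠ "" := fun hw => hne (by rw [hw]; rfl)
    refine ⟨by rw [h1, hmr'], ?_⟩
    rw [h2, hmr']
    by_cases h3 : L < hRun 0 word.toList
    · rw [if_pos h3, if_pos h3]
    · rw [if_neg h3, if_neg h3]
      by_cases h4 : hRun 0 word.toList = L
      · rw [if_pos h4, if_pos ⟨h4, hwe⟩]
      · rw [if_neg h4, if_neg (fun h => h4 h.1)]

-- the outer loop invariant: A's (longest, set(underWordList)) = (B's M, set of A-qualifiers), per prefix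
theorem outer_inv (P : List String) :
    (P.foldl zad3Step (0, [])).1 = lofP P ∧
    PySem.Set.ofList (P.foldl zad3Step (0, [])).2 = PySem.Set.ofList (qualP P) := by
  induction P using List.reverseRecOn with
  | nil => exact ⟨rfl, rfl⟩
  | append_singleton P w ih =>
    obtain ⟨ih1, ih2⟩ := ih
    have hL0 := lofP_nonneg P
    have hlof : lofP (P ++ [w]) = max (lofP P) (mrS w) := by
      unfold lofP; rw [List.foldl_append]; rfl
    have hfold : (P ++ [w]).foldl zad3Step (0, []) = zad3Step (P.foldl zad3Step (0, [])) w := by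
      rw [List.foldl_append]; rfl
    have hpair : P.foldl zad3Step (0, ([] : List String)) =
        (lofP P, (P.foldl zad3Step (0, [])).2) := by
      rw [← ih1]
    obtain ⟨hs1, hs2⟩ := zad3Step_spec (lofP P) (P.foldl zad3Step (0, [])).2 w hL0
    rw [hfold, hpair]
    by_cases hgt : lofP P < mrS w
    · -- w strictly beats every earlier word: qualifiers collapse to [w]
      have hLnew : lofP (P ++ [w]) = mrS w := by rw [hlof]; omega
      have hwne : w ≠ "" := mrS_pos_ne_empty (by omega)
      have hq : qualP (P ++ [w]) = [w] := by
        unfold qualP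
        rw [List.filter_append, hLnew]
        have h1 : P.filter (fun x => x != "" && mrS x == mrS w) = [] := by
          rw [List.filter_eq_nil_iff]
          intro x hx
          have := mrS_le_lofP hx
          simp only [Bool.and_eq_true, beq_iff_eq, bne_iff_ne, ne_eq, not_and]
          intro _ h
          omega
        rw [h1, List.nil_append]
        simp [hwne]
      refine ⟨by rw [hs1, hLnew]; omega, ?_⟩
      rw [hs2, if_pos hgt, hq]; rfl
    · have hLnew : lofP (P ++ [w]) = lofP P := by rw [hlof]; omega
      by_cases heq : mrS w = lofP P ∧ w ≠ ""
      · have hq : qualP (P ++ [w]) = qualP P ++ [w] := by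
          unfold qualP
          rw [List.filter_append, hLnew]
          congr 1
          simp [heq.1, heq.2]
        refine ⟨by rw [hs1, hLnew]; omega, ?_⟩
        rw [hs2, if_neg (by omega), if_pos heq, hq, ofList_append_singleton, ih2]
      · have hq : qualP (P ++ [w]) = qualP P := by
          unfold qualP
          rw [List.filter_append, hLnew]
          have h1 : [w].filter (fun x => x != "" && mrS x == lofP P) = [] := by
            simp only [List.filter_cons, List.filter_nil]
            rw [if_neg (by
              simp only [Bool.and_eq_true, bne_iff_ne, beq_iff_eq, ne_eq]
              exact fun h => heq ⟨h.2, h.1⟩)]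
          rw [h1, List.append_nil]
        refine ⟨by rw [hs1, hLnew]; omega, ?_⟩
        rw [hs2, if_neg (by omega), if_neg heq, hq, ih2]

-- B's qualifiers list is qualB data
theorem zip_map_self {α β : Type} (l : List α) (f : α → β) :
    l.zip (l.map f) = l.map (fun x => (x, f x)) := by
  induction l with
  | nil => rfl
  | cons x l ih => simp [ih]

theorem qualifiers_eq (data : List String) :
    ((data.zip (data.map (fun w => maxrunAlt w.toList))).filter
        (fun p => p.2 == (data.map (fun w => maxrunAlt w.toList)).foldl max 0)).map Prod.fst
      = qualB data := by
  have hM : (data.map (fun w => maxrunAlt w.toList)).foldl max 0 = lofP data := by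
    rw [List.foldl_map]; rfl
  rw [zip_map_self, List.filter_map, List.map_map, hM]
  have : (Prod.fst ∘ fun x : String => (x, maxrunAlt x.toList)) = id := rfl
  rw [this, List.map_id]
  rfl

theorem head?_ofList {α : Type} [BEq α] (l : List α) :
    (PySem.Set.ofList l).head? = l.head? := by
  have key : ∀ (t : List α) (s : PySem.Set α), s ≠ [] →
      (t.foldl PySem.Set.add s).head? = s.head? := by
    intro t
    induction t with
    | nil => intro s _; rfl
    | cons x t ih =>
      intro s hs
      simp only [List.foldl_cons]
      have hadd : (PySem.Set.add s x).head? = s.head? ∧ PySem.Set.add s x ≠ [] := by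
        unfold PySem.Set.add
        split
        · exact ⟨rfl, hs⟩
        · cases s with
          | nil => exact absurd rfl hs
          | cons a s => exact ⟨by simp, by simp⟩
      rw [ih _ hadd.2, hadd.1]
  cases l with
  | nil => rfl
  | cons x l =>
    show ((x :: l).foldl PySem.Set.add []).head? = _
    simp only [List.foldl_cons]
    rw [key l (PySem.Set.add [] x) (by simp [PySem.Set.add, PySem.Set.contains])]
    rfl

-- ===== VERDICT (by name: the statements are the Claim_ definitions above) =====
theorem zad3_spec : Claim_equal_zad3 := by
  intro data _ hpre
  show zad3 data = zad3_alt data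
  obtain ⟨h1, h2⟩ := outer_inv data
  simp only [zad3, zad3_alt]
  rw [qualifiers_eq data, qualB_eq_qualP hpre]
  have hhead : (data.foldl zad3Step (0, [])).2.head? = (qualP data).head? := by
    rw [← head?_ofList, h2, head?_ofList]
  have hM : (data.map (fun w => maxrunAlt w.toList)).foldl max 0 = lofP data := by
    rw [List.foldl_map]; rfl
  simp only [hM, h1, h2, hhead]

theorem zad3_raises : Claim_raises_zad3 := by
  unfold Claim_raises_zad3
  refine ⟨?_, by decide⟩
  intro data _ hr hpre
  obtain ⟨w, hw, hwne⟩ := hpre.1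
  exact hwne (hr.2 w hw)

-- witness self-check: the stated raise-witness output is indeed B's value there
theorem zad3_raises_witness_ok : zad3_alt pvRaiseWitness_zad3 = pvRaiseWitnessOut_zad3 :=
  zad3_raises.2.2.2
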